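-- pv_equiv track=rewrite | github.com/MisterZork/2025A-TP2 | Exercice4.py | trouver_meilleure_table
-- ===== SOURCE A (Python) =====
-- def calculer_score_table(position, taille_table, taille_groupe, nb_colonnes):
--     """
--     Calcule le score d'une table pour un groupe.
--
--     Args:
--         position (tuple): (rangee, colonne) de la table
--         taille_table (int): Capacité de la table (2 ou 4)
--         taille_groupe (int): Nombre de personnes dans le groupe
--         nb_colonnes (int): Nombre total de colonnes (pour calculer proximité fenêtre)
--
--     Returns:
--         int: Score de la table (plus élevé = meilleur)
--             -1 si la table ne convient pas
--     """
--     score = 0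
--
--     # TODO: Calculer le score selon:
--     # - Si taille_table < taille_groupe: retourner -1 (ne convient pas)
--     # - Base: 100 points
--     # - Pénalité: -10 points par place vide (gaspillage)
--     # - Bonus fenêtre: +20 points si colonne == 0 ou colonne == nb_colonnes-1
--     # - Bonus position: +5 points si rangée < 3 (près de l'entrée)
--     if taille_table < taille_groupe:
--         return -1
--     base = 100
--     rangee = position[0]
--     colonne = position[1]
--     if taille_table > taille_groupe:
--         base = base + ((taille_table - taille_groupe)* - 10)
--     if colonne == 0 or colonne == nb_colonnes - 1:
--         base = base + 20
--     if  rangee < 3: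
--         base = base + 5
--     score = base
--
--     return score
--
-- def trouver_meilleure_table(salle, taille_groupe):
--     """
--     Trouve la meilleure table disponible pour un groupe.
--
--     Args:
--         salle (list): Grille de la salle
--         taille_groupe (int): Nombre de personnes
--
--     Returns:
--         tuple: (position, taille_table) ou None si aucune table disponible
--     """
--     meilleure_table = None
--     meilleur_score = -1
--
--     # TODO: Parcourir toutes les tables libres ('L2' ou 'L4')
--     # Calculer leur score et garder la meilleure
--     nb_colonnes = len(salle[0])
--     for rangee in range(len(salle)):
--         for colonne in range(len(salle[rangee])):
--             if salle[rangee][colonne].startswith("L2"):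
--                 a = calculer_score_table((rangee,colonne),2, taille_groupe, nb_colonnes)
--                 if a > meilleur_score:
--                     meilleur_score = a
--                     meilleure_position = ((rangee, colonne),2)
--                     meilleure_table = meilleure_position
--             elif salle[rangee][colonne].startswith("L4"):
--                 b = calculer_score_table((rangee,colonne), 4, taille_groupe, nb_colonnes)
--                 if b > meilleur_score:
--                     meilleur_score = b
--                     meilleure_position = ((rangee,colonne),4)
--                     meilleure_table = meilleure_position
--                 else:
--                     continue
--
--
--
--     return meilleure_table
-- ===== SOURCE B (Python) =====
-- def calculer_score_table(position, taille_table, taille_groupe, nb_colonnes):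
--     if taille_table < taille_groupe:
--         return -1
--     base = 100
--     rangee, colonne = position
--     if taille_table > taille_groupe:
--         base += (taille_table - taille_groupe) * -10
--     if colonne == 0 or colonne == nb_colonnes - 1:
--         base += 20
--     if rangee < 3:
--         base += 5
--     return base
--
--
-- def trouver_meilleure_table(salle, taille_groupe):
--     # Pass 1: collect every free table as a candidate (position, taille, score).
--     nb_colonnes = len(salle[0])
--     candidats = []
--     for rangee, ligne in enumerate(salle):
--         for colonne, case in enumerate(ligne):
--             if case.startswith("L2"):
--                 taille = 2
--             elif case.startswith("L4"):
--                 taille = 4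
--             else:
--                 continue
--             score = calculer_score_table((rangee, colonne), taille, taille_groupe, nb_colonnes)
--             candidats.append(((rangee, colonne), taille, score))
--     # Pass 2: best eligible candidate (max returns the first maximal one).
--     eligibles = [c for c in candidats if c[2] > -1]
--     if not eligibles:
--         return None
--     position, taille, _ = max(eligibles, key=lambda c: c[2])
--     return (position, taille)
-- ===== Notes on version B (the rewrite author's own statement) =====
-- stated objective: alternative
-- what changed: A interleaves scoring and best-tracking in one mutable-state nested loop; B first builds the full candidate list (position, taille, score) in one pass, then filters out unsuitable tables (score > -1) and selects the winner with max(key=score), which takes the first maximal element exactly like A's strict '>' update.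
import Mathlib
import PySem

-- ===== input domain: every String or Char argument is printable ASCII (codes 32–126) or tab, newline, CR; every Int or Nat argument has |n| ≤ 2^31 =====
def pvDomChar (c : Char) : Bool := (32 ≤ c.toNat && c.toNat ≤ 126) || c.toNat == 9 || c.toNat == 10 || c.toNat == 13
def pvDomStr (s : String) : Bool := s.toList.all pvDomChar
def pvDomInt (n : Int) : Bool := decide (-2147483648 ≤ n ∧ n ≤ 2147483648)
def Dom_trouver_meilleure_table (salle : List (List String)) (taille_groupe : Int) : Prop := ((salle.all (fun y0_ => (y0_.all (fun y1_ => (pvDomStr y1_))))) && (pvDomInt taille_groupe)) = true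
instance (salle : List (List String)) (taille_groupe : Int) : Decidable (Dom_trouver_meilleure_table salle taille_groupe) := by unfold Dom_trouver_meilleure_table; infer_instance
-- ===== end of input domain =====

-- B restructures A: one pass collecting (position, taille, score) candidates, then filter score > -1
-- and max(key=score) (first maximal, matching A's strict '>' update); same behaviour, 'alternative' objective.

-- ===== PORT A =====
-- shared module-level helper (used verbatim by both Pythons)
def calculer_score_table (position : Int × Int) (taille_table taille_groupe nb_colonnes : Int) : Int :=
  if taille_table < taille_groupe then -1
  else
    let base : Int := 100
    let rangee := position.1
    let colonne := position.2
    let base := if taille_table > taille_groupe then base + (taille_table - taille_groupe) * (-10) else base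
    let base := if colonne = 0 ∨ colonne = nb_colonnes - 1 then base + 20 else base
    let base := if rangee < 3 then base + 5 else base
    base

def trouver_meilleure_table (salle : List (List String)) (taille_groupe : Int) : Option ((Int × Int) × Int) :=
  let nb_colonnes : Int := ((PySem.List.pyGetD salle 0 []).length : Int)
  let st :=
    (PySem.List.enumerate salle).foldl (fun st rl =>
      (PySem.List.enumerate rl.2).foldl (fun st cc =>
        if PySem.Str.startswith cc.2 "L2" then
          let a := calculer_score_table (rl.1, cc.1) 2 taille_groupe nb_colonnes
          if a > st.1 then (a, some ((rl.1, cc.1), 2)) else st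
        else if PySem.Str.startswith cc.2 "L4" then
          let b := calculer_score_table (rl.1, cc.1) 4 taille_groupe nb_colonnes
          if b > st.1 then (b, some ((rl.1, cc.1), 4)) else st
        else st) st)
      (((-1 : Int), (none : Option ((Int × Int) × Int))))
  st.2

-- ===== PORT B =====
def pvCandidats (salle : List (List String)) (taille_groupe nb_colonnes : Int) :
    List ((Int × Int) × Int × Int) :=
  (PySem.List.enumerate salle).flatMap (fun rl =>
    (PySem.List.enumerate rl.2).filterMap (fun cc =>
      if PySem.Str.startswith cc.2 "L2" then
        some ((rl.1, cc.1), 2, calculer_score_table (rl.1, cc.1) 2 taille_groupe nb_colonnes)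
      else if PySem.Str.startswith cc.2 "L4" then
        some ((rl.1, cc.1), 4, calculer_score_table (rl.1, cc.1) 4 taille_groupe nb_colonnes)
      else none))

def trouver_meilleure_table_alt (salle : List (List String)) (taille_groupe : Int) : Option ((Int × Int) × Int) :=
  let nb_colonnes : Int := ((PySem.List.pyGetD salle 0 []).length : Int)
  let eligibles := (pvCandidats salle taille_groupe nb_colonnes).filter (fun c => c.2.2 > -1)
  match PySem.List.max? eligibles (fun c => c.2.2) with
  | none => none
  | some c => some (c.1, c.2.1)

-- ===== PRECONDITION & SPEC =====
-- Python A evaluates len(salle[0]) first, so it raises IndexError on an empty salle; excluded.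
def Pre_trouver_meilleure_table (salle : List (List String)) (taille_groupe : Int) : Prop := salle ≠ []
instance (salle : List (List String)) (taille_groupe : Int) : Decidable (Pre_trouver_meilleure_table salle taille_groupe) := by unfold Pre_trouver_meilleure_table; infer_instance
def pvWitness_trouver_meilleure_table : List (List String) × Int := ([["L2", "x"], ["L4", "L2"]], 2)

def Spec_trouver_meilleure_table (salle : List (List String)) (taille_groupe : Int) (out : Option ((Int × Int) × Int)) : Prop := out = trouver_meilleure_table_alt salle taille_groupe
instance (salle : List (List String)) (taille_groupe : Int) (out : Option ((Int × Int) × Int)) : Decidable (Spec_trouver_meilleure_table salle taille_groupe out) := by unfold Spec_trouver_meilleure_table; infer_instance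

-- ===== CLAIM (what is proved, stated in full; the proofs are below) =====
def Claim_equal_trouver_meilleure_table : Prop := ∀ (salle : List (List String)) (taille_groupe : Int), Dom_trouver_meilleure_table salle taille_groupe → Pre_trouver_meilleure_table salle taille_groupe → Spec_trouver_meilleure_table salle taille_groupe (trouver_meilleure_table salle taille_groupe)

-- ===== LEMMAS AND PROOFS =====

-- A's loop state corresponding to a max?-accumulator
def pvStateOf : Option ((Int × Int) × Int × Int) → Int × Option ((Int × Int) × Int)
  | none => (-1, none)
  | some c => (c.2.2, some (c.1, c.2.1))

-- A's per-candidate update, extracted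
def pvStep (st : Int × Option ((Int × Int) × Int)) (c : (Int × Int) × Int × Int) :
    Int × Option ((Int × Int) × Int) :=
  if c.2.2 > st.1 then (c.2.2, some (c.1, c.2.1)) else st

-- max?'s accumulator step (literally the fold inside PySem.List.max?)
def pvMStep (acc : Option ((Int × Int) × Int × Int)) (x : (Int × Int) × Int × Int) :
    Option ((Int × Int) × Int × Int) :=
  match acc with
  | none => some x
  | some m => if m.2.2 < x.2.2 then some x else some m

lemma pv_loop_eq (cs : List ((Int × Int) × Int × Int)) :
    ∀ (acc : Option ((Int × Int) × Int × Int)), (∀ c, acc = some c → c.2.2 > -1) →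
      cs.foldl pvStep (pvStateOf acc)
        = pvStateOf ((cs.filter (fun c => c.2.2 > -1)).foldl pvMStep acc) := by
  induction cs with
  | nil => intro acc _; rfl
  | cons c t ih =>
      intro acc hacc
      by_cases hc : c.2.2 > -1
      · simp only [List.foldl_cons, List.filter_cons, hc, decide_true, if_pos]
        cases acc with
        | none =>
            have h1 : pvStep (pvStateOf none) c = pvStateOf (some c) := by
              simp [pvStep, pvStateOf, hc]
            have h2 : pvMStep none c = some c := rfl
            rw [h1, h2]
            exact ih (some c) (by intro d hd; cases hd; exact hc)
        | some m =>
            have hm : m.2.2 > -1 := hacc m rfl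
            by_cases hcm : c.2.2 > m.2.2
            · have h1 : pvStep (pvStateOf (some m)) c = pvStateOf (some c) := by
                simp [pvStep, pvStateOf, hcm]
              have h2 : pvMStep (some m) c = some c := by
                simp [pvMStep, hcm]
              rw [h1, h2]
              exact ih (some c) (by intro d hd; cases hd; exact hc)
            · have h1 : pvStep (pvStateOf (some m)) c = pvStateOf (some m) := by
                simp [pvStep, pvStateOf, hcm]
              have h2 : pvMStep (some m) c = some m := by
                simp [pvMStep]; omega
              rw [h1, h2]
              exact ih (some m) hacc
      · simp only [List.foldl_cons, List.filter_cons, hc, decide_false, if_neg, Bool.false_eq_true,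
          not_false_iff]
        have h1 : pvStep (pvStateOf acc) c = pvStateOf acc := by
          cases acc with
          | none => simp [pvStep, pvStateOf]; omega
          | some m =>
              have hm : m.2.2 > -1 := hacc m rfl
              simp [pvStep, pvStateOf]; omega
        rw [h1]
        exact ih acc hacc

-- A's nested cell loop is the candidate fold
lemma pv_nested_eq (salle : List (List String)) (taille_groupe nb_colonnes : Int) :
    (PySem.List.enumerate salle).foldl (fun st rl =>
      (PySem.List.enumerate rl.2).foldl (fun st cc =>
        if PySem.Str.startswith cc.2 "L2" then
          let a := calculer_score_table (rl.1, cc.1) 2 taille_groupe nb_colonnes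
          if a > st.1 then (a, some ((rl.1, cc.1), 2)) else st
        else if PySem.Str.startswith cc.2 "L4" then
          let b := calculer_score_table (rl.1, cc.1) 4 taille_groupe nb_colonnes
          if b > st.1 then (b, some ((rl.1, cc.1), 4)) else st
        else st) st)
      (((-1 : Int), (none : Option ((Int × Int) × Int))))
    = (pvCandidats salle taille_groupe nb_colonnes).foldl pvStep (-1, none) := by
  rw [pvCandidats, List.foldl_flatMap]
  apply List.foldl_ext
  intro st rl _
  rw [List.foldl_filterMap]
  apply List.foldl_ext
  intro st' cc _
  cases hb2 : PySem.Chars.startswith cc.2.toList ['L', '2'] <;>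
    cases hb4 : PySem.Chars.startswith cc.2.toList ['L', '4'] <;>
      simp [pvStep, hb2, hb4]

lemma pv_max?_eq (l : List ((Int × Int) × Int × Int)) :
    PySem.List.max? l (fun c => c.2.2) = l.foldl pvMStep none := by
  unfold PySem.List.max?
  congr 1
  funext acc x
  cases acc <;> rfl

-- ===== VERDICT (by name: the statement is the Claim_ definition above) =====
theorem trouver_meilleure_table_spec : Claim_equal_trouver_meilleure_table := by
  intro salle taille_groupe _ _
  unfold Spec_trouver_meilleure_table
  simp only [trouver_meilleure_table, trouver_meilleure_table_alt]
  rw [pv_nested_eq]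
  have h := pv_loop_eq
    (pvCandidats salle taille_groupe ((PySem.List.pyGetD salle 0 []).length : Int))
    none (by intro c hc; cases hc)
  rw [show ((-1 : Int), (none : Option ((Int × Int) × Int))) = pvStateOf none from rfl, h,
    pv_max?_eq]
  cases (List.filter (fun c => decide (c.2.2 > -1))
      (pvCandidats salle taille_groupe ((PySem.List.pyGetD salle 0 []).length : Int))).foldl pvMStep none with
  | none => rfl
  | some c => rfl
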